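-- pv_equiv track=rewrite | github.com/CONEXUS-dev/conexus-sovereign-ai | fe_pf_replication_2026/v1_exact_reproduction.py | is_valid_v2
-- ===== SOURCE A (Python) =====
-- def is_valid_v2(positions):
--     """V2: self-avoidance + connectivity"""
--     if len(positions) != len(set(positions)):
--         return False
--     for i in range(len(positions) - 1):
--         dist = sum(abs(positions[i][k] - positions[i+1][k]) for k in range(3))
--         if dist != 1:
--             return False
--     return True
-- ===== SOURCE B (Python) =====
-- def is_valid_v2(positions):
--     """Adjacency via zipped consecutive pairs; self-avoidance by sorting the
--     points and scanning for equal neighbours (sort-then-scan, no hash set)."""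
--     for p, q in zip(positions, positions[1:]):
--         if abs(p[0] - q[0]) + abs(p[1] - q[1]) + abs(p[2] - q[2]) != 1:
--             return False
--     s = sorted(positions)
--     return all(a != b for a, b in zip(s, s[1:]))
-- ===== Notes on version B (the rewrite author's own statement) =====
-- stated objective: alternative
-- what changed: Duplicate detection is done by sorting the points and scanning for equal neighbours (sort-then-scan, no hash set), and adjacency is checked over zipped consecutive pairs instead of an index loop; A instead compares len(positions) with len(set(positions)) and indexes with range.
import Mathlib
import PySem

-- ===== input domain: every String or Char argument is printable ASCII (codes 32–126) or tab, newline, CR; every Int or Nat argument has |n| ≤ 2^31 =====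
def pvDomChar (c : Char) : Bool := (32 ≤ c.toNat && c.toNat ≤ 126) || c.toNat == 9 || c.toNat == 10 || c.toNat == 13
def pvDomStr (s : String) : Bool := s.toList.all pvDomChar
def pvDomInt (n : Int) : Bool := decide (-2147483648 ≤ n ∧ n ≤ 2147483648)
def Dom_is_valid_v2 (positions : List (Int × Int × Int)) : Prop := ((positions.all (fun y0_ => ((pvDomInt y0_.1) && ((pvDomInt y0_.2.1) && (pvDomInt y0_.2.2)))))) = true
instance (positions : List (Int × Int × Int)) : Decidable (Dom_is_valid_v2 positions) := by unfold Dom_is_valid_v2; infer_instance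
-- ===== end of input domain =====

-- B replaces A's hash-set cardinality test by sort-then-scan for equal neighbours and its
-- index loop by zipped consecutive pairs; alternative decomposition, O(n log n) vs O(n).

-- ===== PORT A =====
-- sum(abs(positions[i][k] - positions[i+1][k]) for k in range(3)): tuple indexing unrolled at k = 0,1,2 (exact)
def distA (positions : List (Int × Int × Int)) (i : Int) : Int :=
  let p := PySem.List.pyGetD positions i (0, 0, 0)
  let q := PySem.List.pyGetD positions (i + 1) (0, 0, 0)
  |p.1 - q.1| + |p.2.1 - q.2.1| + |p.2.2 - q.2.2|

def is_valid_v2 (positions : List (Int × Int × Int)) : Bool :=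
  if positions.length ≠ (PySem.Set.ofList positions).length then false
  else
    -- 'for i in range(len(positions) - 1): if dist != 1: return False' then 'return True'
    (PySem.List.pyRange 0 ((positions.length : Int) - 1) 1).all (fun i => distA positions i == 1)

-- ===== PORT B =====
-- abs(p[0]-q[0]) + abs(p[1]-q[1]) + abs(p[2]-q[2])
def manh (p q : Int × Int × Int) : Int :=
  |p.1 - q.1| + |p.2.1 - q.2.1| + |p.2.2 - q.2.2|

-- Python's lexicographic tuple comparison, as the sort key
def keyB (p : Int × Int × Int) : Int ×ₗ (Int ×ₗ Int) := toLex (p.1, toLex (p.2.1, p.2.2))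

def is_valid_v2_alt (positions : List (Int × Int × Int)) : Bool :=
  -- 'for p, q in zip(positions, positions[1:]): if … != 1: return False'
  if (positions.zip (positions.drop 1)).all (fun pq => manh pq.1 pq.2 == 1) then
    -- 's = sorted(positions); return all(a != b for a, b in zip(s, s[1:]))'
    let s := PySem.List.sorted positions keyB false
    (s.zip (s.drop 1)).all (fun ab => ab.1 != ab.2)
  else false

-- ===== PRECONDITION & SPEC =====
def Spec_is_valid_v2 (positions : List (Int × Int × Int)) (out : Bool) : Prop := out = is_valid_v2_alt positions
instance (positions : List (Int × Int × Int)) (out : Bool) : Decidable (Spec_is_valid_v2 positions out) := by unfold Spec_is_valid_v2; infer_instance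

-- ===== CLAIM (what is proved, stated in full; the proofs are below) =====
def Claim_equal_is_valid_v2 : Prop := ∀ (positions : List (Int × Int × Int)), Dom_is_valid_v2 positions → Spec_is_valid_v2 positions (is_valid_v2 positions)

-- ===== LEMMAS AND PROOFS =====

-- unit Manhattan adjacency of two consecutive points
def adjP (p q : Int × Int × Int) : Prop := manh p q = 1

theorem foldl_add_length_le (xs : List (Int × Int × Int)) (s : PySem.Set (Int × Int × Int)) :
    (xs.foldl PySem.Set.add s).length ≤ s.length + xs.length := by
  induction xs generalizing s with
  | nil => simp
  | cons x xs ih =>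
    simp only [List.foldl_cons]
    refine le_trans (ih _) ?_
    simp only [PySem.Set.add]
    split
    · simp
    · simp [List.length_append]; omega

theorem foldl_add_length_eq_iff (xs : List (Int × Int × Int)) (s : PySem.Set (Int × Int × Int)) :
    (xs.foldl PySem.Set.add s).length = s.length + xs.length ↔
      xs.Nodup ∧ ∀ x ∈ xs, x ∉ s := by
  induction xs generalizing s with
  | nil => simp
  | cons x xs ih =>
    simp only [List.foldl_cons, List.nodup_cons]
    by_cases hx : x ∈ s
    · rw [PySem.Set.add_of_mem hx]
      constructor
      · intro h
        have := foldl_add_length_le xs s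
        simp only [List.length_cons] at h
        omega
      · rintro ⟨-, hall⟩
        exact absurd hx (hall x (List.mem_cons_self ..))
    · rw [PySem.Set.add_of_not_mem hx,
          show s.length + (x :: xs).length = (s ++ [x]).length + xs.length by
            simp [List.length_append]; omega,
          ih (s ++ [x])]
      constructor
      · rintro ⟨hnd, hall⟩
        refine ⟨⟨fun hm => (hall x hm) (by simp), hnd⟩, fun y hy => ?_⟩
        rcases List.mem_cons.mp hy with rfl | hy
        · exact hx
        · exact fun hs => (hall y hy) (by simp [hs])
      · rintro ⟨⟨hxx, hnd⟩, hall⟩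
        refine ⟨hnd, fun y hy hm => ?_⟩
        rcases List.mem_append.mp hm with hs | he
        · exact hall y (by simp [hy]) hs
        · simp only [List.mem_singleton] at he
          subst he
          exact hxx hy

theorem ofList_length_iff (xs : List (Int × Int × Int)) :
    ((PySem.Set.ofList xs).length = xs.length) ↔ xs.Nodup := by
  rw [PySem.Set.ofList_eq_foldl]
  have h := foldl_add_length_eq_iff xs []
  simp only [List.length_nil, Nat.zero_add, List.not_mem_nil, not_false_iff,
    implies_true, and_true] at h
  exact h

theorem is_valid_v2_iff (positions : List (Int × Int × Int)) :
    is_valid_v2 positions = true ↔ positions.Nodup ∧ List.IsChain adjP positions := by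
  unfold is_valid_v2
  split
  · rename_i h
    simp only [Bool.false_eq_true, false_iff]
    rintro ⟨hnd, -⟩
    exact h ((ofList_length_iff positions).mpr hnd).symm
  · rename_i h
    rw [not_not] at h
    rw [List.all_eq_true]
    constructor
    · intro hall
      refine ⟨(ofList_length_iff positions).mp h.symm, ?_⟩
      rw [List.isChain_iff_getElem]
      intro i hi
      have hmem : (i : Int) ∈ PySem.List.pyRange 0 ((positions.length : Int) - 1) 1 := by
        rw [PySem.List.mem_pyRange_one]
        omega
      have hthis := hall _ hmem
      simp only [beq_iff_eq, distA] at hthis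
      rw [PySem.List.pyGetD_eq_getElem _ _ (by omega) (by omega),
          PySem.List.pyGetD_eq_getElem _ _ (by omega) (by omega)] at hthis
      have e1 : ((i : Int)).toNat = i := by omega
      have e2 : ((i : Int) + 1).toNat = i + 1 := by omega
      simp only [e1, e2] at hthis
      exact hthis
    · rintro ⟨-, hch⟩ i hmem
      rw [PySem.List.mem_pyRange_one] at hmem
      obtain ⟨h0, hlt⟩ := hmem
      rw [List.isChain_iff_getElem] at hch
      have hi : i.toNat + 1 < positions.length := by omega
      have hthis := hch i.toNat hi
      simp only [beq_iff_eq, distA]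
      rw [PySem.List.pyGetD_eq_getElem _ _ (by omega) (by omega),
          PySem.List.pyGetD_eq_getElem _ _ (by omega) (by omega)]
      have e2 : (i + 1).toNat = i.toNat + 1 := by omega
      simp only [e2]
      exact hthis

-- the zipped consecutive-pair scan is exactly an IsChain statement
theorem zipAll_iff_isChain (f : (Int × Int × Int) → (Int × Int × Int) → Bool)
    (xs : List (Int × Int × Int)) :
    ((xs.zip (xs.drop 1)).all (fun ab => f ab.1 ab.2)) = true ↔
      List.IsChain (fun a b => f a b = true) xs := by
  induction xs with
  | nil => simp
  | cons a t ih =>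
    cases t with
    | nil => simp
    | cons b t' =>
      simp only [List.drop_succ_cons, List.drop_zero, List.zip_cons_cons, List.all_cons,
        Bool.and_eq_true, List.isChain_cons_cons]
      simp only [List.drop_succ_cons, List.drop_zero] at ih
      rw [ih]

theorem keyB_injective : Function.Injective keyB := by
  intro p q h
  unfold keyB at h
  have h1 := toLex.injective h
  have h2 := congrArg Prod.snd h1
  have h3 := toLex.injective h2
  obtain ⟨a1, a2, a3⟩ := p
  obtain ⟨b1, b2, b3⟩ := q
  simp_all

-- a key-sorted list with all consecutive pairs distinct has no duplicates at all
theorem nodup_of_pairwise_le_of_chain_ne (s : List (Int × Int × Int))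
    (hp : s.Pairwise (fun a b => keyB a ≤ keyB b))
    (hc : List.IsChain (fun a b : Int × Int × Int => a ≠ b) s) : s.Nodup := by
  induction s with
  | nil => simp
  | cons a t ih =>
    rw [List.pairwise_cons] at hp
    obtain ⟨hall, hpt⟩ := hp
    rw [List.nodup_cons]
    cases t with
    | nil => simp
    | cons b t' =>
      rw [List.isChain_cons_cons] at hc
      obtain ⟨hab, hct⟩ := hc
      refine ⟨?_, ih hpt hct⟩
      have hablt : keyB a < keyB b :=
        lt_of_le_of_ne (hall b (List.mem_cons_self ..)) (fun h => hab (keyB_injective h))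
      intro hm
      rcases List.mem_cons.mp hm with rfl | hm'
      · exact hab rfl
      · have hbc : keyB b ≤ keyB a := by
          rw [List.pairwise_cons] at hpt
          exact hpt.1 a hm'
        exact absurd (lt_of_lt_of_le hablt hbc) (lt_irrefl _)

theorem chain_ne_of_nodup (s : List (Int × Int × Int)) (hnd : s.Nodup) :
    List.IsChain (fun a b : Int × Int × Int => a ≠ b) s := by
  induction s with
  | nil => simp
  | cons a t ih =>
    rw [List.nodup_cons] at hnd
    cases t with
    | nil => simp
    | cons b t' =>
      rw [List.isChain_cons_cons]
      exact ⟨fun h => hnd.1 (h ▸ List.mem_cons_self ..), ih hnd.2⟩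

theorem is_valid_v2_alt_iff (positions : List (Int × Int × Int)) :
    is_valid_v2_alt positions = true ↔ positions.Nodup ∧ List.IsChain adjP positions := by
  unfold is_valid_v2_alt
  split
  · rename_i h
    have hch : List.IsChain adjP positions := by
      have := (zipAll_iff_isChain (fun a b => manh a b == 1) positions).mp h
      simpa only [beq_iff_eq] using this
    rw [zipAll_iff_isChain (fun a b => a != b)]
    simp only [bne_iff_ne, ne_eq]
    have hperm := PySem.List.sorted_perm positions keyB false
    constructor
    · intro hcne
      refine ⟨?_, hch⟩
      have := nodup_of_pairwise_le_of_chain_ne _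
        (PySem.List.sorted_pairwise positions keyB) hcne
      exact hperm.nodup_iff.mp this
    · rintro ⟨hnd, -⟩
      exact chain_ne_of_nodup _ (hperm.nodup_iff.mpr hnd)
  · rename_i h
    simp only [Bool.false_eq_true, false_iff]
    rintro ⟨-, hch⟩
    apply h
    rw [zipAll_iff_isChain (fun a b => manh a b == 1)]
    simp only [beq_iff_eq]
    exact hch

-- ===== VERDICT (by name: the statement is the Claim_ definition above) =====
theorem is_valid_v2_spec : Claim_equal_is_valid_v2 := by
  intro positions _
  unfold Spec_is_valid_v2
  rw [Bool.eq_iff_iff, is_valid_v2_iff, is_valid_v2_alt_iff]
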